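-- pv_equiv track=rewrite | github.com/Zimiao1025/BioSeq-BLM | code/FeatureExtractionMode/utils/utils_words.py | combination_dck
-- ===== SOURCE A (Python) =====
-- def combination_dck(s, k, dc):
--     # dc: 距离控制参数
--
--     if k == 0:
--         return ['']
--     sub_letters = []
--     # 此处涉及到一个 python 遍历循环的特点：当遍历的对象为空（列表，字符串...）时，循环不会被执行，range(0) 也是一样
--
--     for i in range(len(s)):
--
--         for letter in combination_dck(s[i + 1: i + dc], k - 1, dc):
--             sub_letters += [s[i] + letter]
--
--     return sub_letters
-- ===== SOURCE B (Python) =====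
-- def combination_dck(s, k, dc):
--     # Iterative breadth-first level expansion over (prefix, remaining slice) pairs
--     # instead of A's depth-first recursion; same lexicographic-by-index order.
--     if k < 0:
--         return []
--     pairs = [('', s)]
--     for _ in range(k):
--         if not pairs:
--             break
--         pairs = [(p + t[i], t[i + 1: i + dc]) for (p, t) in pairs for i in range(len(t))]
--     return [p for (p, _) in pairs]
-- ===== Notes on version B (the rewrite author's own statement) =====
-- stated objective: alternative
-- what changed: Replaces A's depth-first recursion on string slices with an iterative breadth-first expansion: a worklist of (prefix, remaining-slice) pairs is expanded k times level by level, then the prefixes are read off; output and order are identical.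
import Mathlib
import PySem

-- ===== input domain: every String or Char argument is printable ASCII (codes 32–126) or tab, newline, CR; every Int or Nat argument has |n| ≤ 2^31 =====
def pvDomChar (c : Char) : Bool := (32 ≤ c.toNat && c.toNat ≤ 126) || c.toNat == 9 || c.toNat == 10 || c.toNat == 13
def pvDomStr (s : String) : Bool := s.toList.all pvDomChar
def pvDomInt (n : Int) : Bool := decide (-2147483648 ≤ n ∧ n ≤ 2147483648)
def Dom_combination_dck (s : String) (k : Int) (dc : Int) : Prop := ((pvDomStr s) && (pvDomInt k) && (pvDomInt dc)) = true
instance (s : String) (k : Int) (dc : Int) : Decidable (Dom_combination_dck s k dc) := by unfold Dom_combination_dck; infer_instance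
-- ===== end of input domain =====

-- B replaces A's depth-first recursion on slices by an iterative breadth-first
-- level expansion of (prefix, remaining-slice) pairs; same output, same order (objective: alternative).

-- termination lemma for the A port: the recursive slice s[i+1:i+dc] is strictly shorter
theorem pvSliceLenLt (s : List Char) (i : Nat) (hi : i < s.length) (dc : Int) :
    (PySem.List.slice s (some ((i : Int) + 1)) (some ((i : Int) + dc))).length < s.length := by
  rw [PySem.List.length_slice]
  have h1 : PySem.List.clampIdx s.length ((i : Int) + 1) = min (i + 1) s.length := by
    have := PySem.List.clampIdx_natCast (n := s.length) (k := i + 1)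
    push_cast at this ⊢
    omega
  have h2 := PySem.List.clampIdx_le (n := s.length) (i := (i : Int) + dc)
  omega

-- ===== PORT A =====
-- A's recursion, over the code points (PySem strings are lists of chars)
def combAux (s : List Char) (k : Int) (dc : Int) : List (List Char) :=
  if k = 0 then [[]]
  else
    (List.range s.length).attach.foldl
      (fun acc i =>
        acc ++ (combAux
            (PySem.List.slice s (some ((i.1 : Int) + 1)) (some ((i.1 : Int) + dc)))
            (k - 1) dc).map
          (fun letter => PySem.List.pyGetD s (i.1 : Int) ' ' :: letter)) []
termination_by s.length
decreasing_by exact pvSliceLenLt s i.1 (List.mem_range.mp i.2) dc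

def combination_dck (s : String) (k : Int) (dc : Int) : List String :=
  (combAux s.toList k dc).map (fun l => String.ofList l)

-- ===== PORT B =====
-- one breadth-first level: expand every (prefix, remaining slice) pair
def stepAlt (dc : Int) (pairs : List (List Char × List Char)) : List (List Char × List Char) :=
  pairs.flatMap (fun pt =>
    (List.range pt.2.length).map (fun (i : Nat) =>
      (pt.1 ++ [PySem.List.pyGetD pt.2 (i : Int) ' '],
       PySem.List.slice pt.2 (some ((i : Int) + 1)) (some ((i : Int) + dc)))))

-- the level loop, with Source B's early exit on an empty worklist
def altIter (dc : Int) : Nat → List (List Char × List Char) → List (List Char × List Char)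
  | 0, pairs => pairs
  | n + 1, pairs => if pairs.isEmpty then pairs else altIter dc n (stepAlt dc pairs)

def combination_dck_alt (s : String) (k : Int) (dc : Int) : List String :=
  if k < 0 then []
  else (altIter dc k.toNat [([], s.toList)]).map (fun pt => String.ofList pt.1)

-- ===== PRECONDITION & SPEC =====
def Spec_combination_dck (s : String) (k : Int) (dc : Int) (out : List String) : Prop := out = combination_dck_alt s k dc
instance (s : String) (k : Int) (dc : Int) (out : List String) : Decidable (Spec_combination_dck s k dc out) := by unfold Spec_combination_dck; infer_instance

-- ===== CLAIM (what is proved, stated in full; the proofs are below) =====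
def Claim_equal_combination_dck : Prop := ∀ (s : String) (k : Int) (dc : Int), Dom_combination_dck s k dc → Spec_combination_dck s k dc (combination_dck s k dc)

-- ===== LEMMAS AND PROOFS =====

-- A returns [] for negative k (the string shrinks until the loop is empty)
theorem combAux_neg : ∀ (n : Nat) (s : List Char), s.length = n → ∀ (k dc : Int), k < 0 →
    combAux s k dc = [] := by
  intro n
  induction n using Nat.strong_induction_on with
  | _ n ih =>
    intro s hs k dc hk
    rw [combAux, if_neg (by omega)]
    have hz : ∀ i ∈ (List.range s.length).attach,
        (combAux (PySem.List.slice s (some ((i.1 : Int) + 1)) (some ((i.1 : Int) + dc)))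
          (k - 1) dc) = [] := by
      intro i _
      exact ih _ (hs ▸ pvSliceLenLt s i.1 (List.mem_range.mp i.2) dc) _ rfl _ _ (by omega)
    calc (List.range s.length).attach.foldl
          (fun acc i => acc ++ (combAux
              (PySem.List.slice s (some ((i.1 : Int) + 1)) (some ((i.1 : Int) + dc)))
              (k - 1) dc).map
            (fun letter => PySem.List.pyGetD s (i.1 : Int) ' ' :: letter)) []
        = (List.range s.length).attach.foldl (fun acc _ => acc) [] := by
          refine PySem.List.foldl_congr_mem _ _ _ _ ?_
          intro acc i hi
          rw [hz i hi]; simp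
      _ = [] := List.foldl_fixed _


theorem pvFlatMapAttach {α β : Type} (xs : List α) (F : α → List β) :
    xs.attach.flatMap (fun i => F i.1) = xs.flatMap F := by
  conv_rhs => rw [← List.attach_map_subtype_val xs]
  rw [List.flatMap_map]

-- unfold A's loop into a flatMap over the index range
theorem combAux_succ (s : List Char) (k dc : Int) (hk : k ≠ 0) :
    combAux s k dc = (List.range s.length).flatMap (fun (i : Nat) =>
      (combAux (PySem.List.slice s (some ((i : Int) + 1)) (some ((i : Int) + dc))) (k - 1) dc).map
        (fun letter => PySem.List.pyGetD s (i : Int) ' ' :: letter)) := by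
  rw [combAux, if_neg hk]
  rw [PySem.List.foldl_append_eq_flatMap]
  rw [List.nil_append]
  exact pvFlatMapAttach (List.range s.length) (fun i =>
    (combAux (PySem.List.slice s (some ((i : Int) + 1)) (some ((i : Int) + dc))) (k - 1) dc).map
      (fun letter => PySem.List.pyGetD s (i : Int) ' ' :: letter))

-- the early exit is invisible: expanding an empty worklist keeps it empty
theorem foldl_step_nil (dc : Int) : ∀ (n : Nat),
    (List.range n).foldl (fun ps _ => stepAlt dc ps) ([] : List (List Char × List Char)) = [] := by
  intro n
  induction n with
  | zero => rfl
  | succ m ih => rw [List.range_succ, List.foldl_append, ih]; rfl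

theorem altIter_eq_foldl (dc : Int) : ∀ (n : Nat) (pairs : List (List Char × List Char)),
    altIter dc n pairs = (List.range n).foldl (fun ps _ => stepAlt dc ps) pairs := by
  intro n
  induction n with
  | zero => intro pairs; rfl
  | succ m ih =>
    intro pairs
    rw [List.range_succ_eq_map]
    simp only [List.foldl_cons, List.foldl_map]
    rw [altIter]
    by_cases hp : pairs.isEmpty
    · rw [if_pos hp, List.isEmpty_iff.mp hp]
      rw [show stepAlt dc [] = [] from rfl, foldl_step_nil]
    · rw [if_neg hp, ih]

-- invariant of B's iteration: prefixes after n levels = each pair's prefix ++ A's results on its slice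
theorem step_invariant (dc : Int) (n : Nat) :
    ∀ (pairs : List (List Char × List Char)),
      (((List.range n).foldl (fun ps _ => stepAlt dc ps) pairs).map Prod.fst)
        = pairs.flatMap (fun pt => (combAux pt.2 (n : Int) dc).map (fun l => pt.1 ++ l)) := by
  induction n with
  | zero =>
    intro pairs
    simp [combAux]
    induction pairs with
    | nil => rfl
    | cons p ps ihp => simp_all
  | succ m ih =>
    intro pairs
    rw [List.range_succ_eq_map]
    simp only [List.foldl_cons, List.foldl_map]
    rw [ih (stepAlt dc pairs)]
    unfold stepAlt
    rw [List.flatMap_assoc]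
    congr 1
    funext pt
    rw [List.flatMap_map]
    have hunf := combAux_succ pt.2 ((m : Int) + 1) dc (by omega)
    have : ((m : Int) + 1) - 1 = (m : Int) := by omega
    rw [this] at hunf
    rw [show ((m + 1 : Nat) : Int) = (m : Int) + 1 from by push_cast; ring, hunf]
    rw [List.map_flatMap]
    refine congrArg₂ _ (funext fun i => ?_) rfl
    rw [List.map_map]
    refine congrArg₂ _ (funext fun l => ?_) rfl
    simp

-- ===== VERDICT (by name: the statement is the Claim_ definition above) =====
theorem combination_dck_spec : Claim_equal_combination_dck := by
  intro s k dc _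
  show combination_dck s k dc = combination_dck_alt s k dc
  unfold combination_dck combination_dck_alt
  by_cases hk : k < 0
  · rw [if_pos hk, combAux_neg s.toList.length s.toList rfl k dc hk]
    rfl
  · rw [if_neg hk]
    have hkk : ((k.toNat : Nat) : Int) = k := Int.toNat_of_nonneg (by omega)
    have h := step_invariant dc k.toNat [([], s.toList)]
    rw [hkk] at h
    rw [altIter_eq_foldl]
    calc (combAux s.toList k dc).map (fun l => String.ofList l)
        = (([([], s.toList)] : List (List Char × List Char)).flatMap
            (fun pt => (combAux pt.2 k dc).map (fun l => pt.1 ++ l))).map (fun l => String.ofList l) := by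
          simp
      _ = (((List.range k.toNat).foldl (fun ps _ => stepAlt dc ps) [([], s.toList)]).map Prod.fst).map
            (fun l => String.ofList l) := by rw [h]
      _ = ((List.range k.toNat).foldl (fun ps _ => stepAlt dc ps) [([], s.toList)]).map
            (fun pt => String.ofList pt.1) := by rw [List.map_map]; rfl
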